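-- pv_equiv track=rewrite | github.com/kiss2u/olmocr | olmocr/bench/miners/mine_tables_gpt_simple.py | get_cell_count_bucket
-- ===== SOURCE A (Python) =====
-- def get_cell_count_bucket(total_cells: int) -> str:
--     """
--     Get the folder name for a given cell count, bucketed by powers of 2.
--
--     Args:
--         total_cells: Total number of cells across all tables
--
--     Returns:
--         str: Folder name like "0_cells", "1_cell", "2_cells", "4_cells", etc.
--     """
--     if total_cells == 0:
--         return "0_cells"
--     elif total_cells == 1:
--         return "1_cell"
--     else:
--         # Find the next power of 2 >= total_cells
--         power = 1
--         while power < total_cells: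
--             power *= 2
--         return f"{power}_cells"
-- ===== SOURCE B (Python) =====
-- def get_cell_count_bucket(total_cells: int) -> str:
--     if total_cells == 0:
--         return "0_cells"
--     if total_cells == 1:
--         return "1_cell"
--     power = 1 << max(total_cells - 1, 0).bit_length()
--     return f"{power}_cells"
-- ===== Notes on version B (the rewrite author's own statement) =====
-- stated objective: idiomatic
-- what changed: Replaced the doubling while-loop with a closed-form next-power-of-two via bit_length and a shift.
import Mathlib
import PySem

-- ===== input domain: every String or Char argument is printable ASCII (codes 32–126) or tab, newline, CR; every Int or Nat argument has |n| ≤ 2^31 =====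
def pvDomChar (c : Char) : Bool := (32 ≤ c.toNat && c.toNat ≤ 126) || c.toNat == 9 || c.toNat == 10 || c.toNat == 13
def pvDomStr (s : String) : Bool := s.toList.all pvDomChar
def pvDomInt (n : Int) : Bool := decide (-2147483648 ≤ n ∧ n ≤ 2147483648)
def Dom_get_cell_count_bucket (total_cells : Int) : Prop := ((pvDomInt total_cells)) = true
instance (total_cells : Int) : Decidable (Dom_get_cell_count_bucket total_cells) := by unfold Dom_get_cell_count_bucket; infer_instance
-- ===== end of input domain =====

-- B replaces A's doubling while-loop by a closed-form bit-length shift (idiomatic, same results).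

-- ===== PORT A =====
-- A's while loop: power = 1; while power < total_cells: power *= 2
def pvLoopA (total power : Int) (h : 1 ≤ power) : Int :=
  if _hlt : power < total then pvLoopA total (power * 2) (by omega) else power
termination_by (total - power).toNat
decreasing_by omega

def get_cell_count_bucket (total_cells : Int) : String :=
  if total_cells = 0 then "0_cells"
  else if total_cells = 1 then "1_cell"
  else PySem.Int.toStr (pvLoopA total_cells 1 (by norm_num)) ++ "_cells"

-- ===== PORT B =====
-- 1 << max(total_cells - 1, 0).bit_length(); Nat.size is Python's bit_length on nonnegative ints
def get_cell_count_bucket_alt (total_cells : Int) : String :=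
  if total_cells = 0 then "0_cells"
  else if total_cells = 1 then "1_cell"
  else
    let power : Int := Int.ofNat (1 <<< (max (total_cells - 1) 0).toNat.size)
    PySem.Int.toStr power ++ "_cells"

-- ===== PRECONDITION & SPEC =====
def Spec_get_cell_count_bucket (total_cells : Int) (out : String) : Prop := out = get_cell_count_bucket_alt total_cells
instance (total_cells : Int) (out : String) : Decidable (Spec_get_cell_count_bucket total_cells out) := by unfold Spec_get_cell_count_bucket; infer_instance

-- ===== CLAIM (what is proved, stated in full; the proofs are below) =====
def Claim_equal_get_cell_count_bucket : Prop := ∀ (total_cells : Int), Dom_get_cell_count_bucket total_cells → Spec_get_cell_count_bucket total_cells (get_cell_count_bucket total_cells)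

-- ===== LEMMAS AND PROOFS =====

-- the loop started at 2^k returns 2^(max k (bit_length (t-1))) for t ≥ 2
theorem pvLoopA_pow (t : Int) (ht : 2 ≤ t) :
    ∀ (d k : Nat), (t - 2 ^ k).toNat ≤ d →
      ∀ (h : (1 : Int) ≤ 2 ^ k),
        pvLoopA t ((2 : Int) ^ k) h = (2 : Int) ^ (max k (t - 1).toNat.size) := by
  intro d
  induction d with
  | zero =>
    intro k hk h
    have hle : t ≤ (2 : Int) ^ k := by omega
    rw [pvLoopA]
    have hnlt : ¬ ((2 : Int) ^ k < t) := by omega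
    simp only [hnlt, dite_false]
    have hsz : (t - 1).toNat.size ≤ k := by
      apply Nat.size_le.mpr
      have : ((t - 1).toNat : Int) < ((2 ^ k : Nat) : Int) := by push_cast; omega
      exact_mod_cast this
    rw [max_eq_left hsz]
  | succ d ih =>
    intro k hk h
    by_cases hlt : (2 : Int) ^ k < t
    · rw [pvLoopA]
      simp only [hlt, dite_true]
      have hps : (2 : Int) ^ k * 2 = (2 : Int) ^ (k + 1) := (pow_succ 2 k).symm
      have h1 : (1 : Int) ≤ 2 ^ (k + 1) := one_le_pow₀ (by norm_num)
      have heq : pvLoopA t ((2 : Int) ^ k * 2) (by omega) = pvLoopA t ((2 : Int) ^ (k + 1)) h1 := by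
        congr 1
      rw [heq, ih (k + 1) (by rw [pow_succ]; omega) h1]
      have hk1 : k < (t - 1).toNat.size := by
        apply Nat.lt_size.mpr
        have : ((2 ^ k : Nat) : Int) ≤ ((t - 1).toNat : Int) := by push_cast; omega
        exact_mod_cast this
      congr 1
      omega
    · rw [pvLoopA]
      simp only [hlt, dite_false]
      have hsz : (t - 1).toNat.size ≤ k := by
        apply Nat.size_le.mpr
        have : ((t - 1).toNat : Int) < ((2 ^ k : Nat) : Int) := by push_cast; omega
        exact_mod_cast this
      rw [max_eq_left hsz]

-- ===== VERDICT (by name: the statement is the Claim_ definition above) =====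
theorem get_cell_count_bucket_spec : Claim_equal_get_cell_count_bucket := by
  intro t _
  unfold Spec_get_cell_count_bucket get_cell_count_bucket get_cell_count_bucket_alt
  by_cases h0 : t = 0
  · simp [h0]
  by_cases h1 : t = 1
  · simp [h1]
  simp only [h0, h1, if_false]
  by_cases h2 : 2 ≤ t
  · -- loop starts at 1 = 2^0
    have hmax : max (t - 1) 0 = t - 1 := by omega
    have hone : (1 : Int) = (2 : Int) ^ (0 : Nat) := by norm_num
    have hloop : pvLoopA t 1 (by norm_num) = (2 : Int) ^ (t - 1).toNat.size := by
      have := pvLoopA_pow t h2 (t - 2 ^ 0).toNat 0 (le_refl _) (by norm_num)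
      simpa using this
    rw [hloop, hmax]
    congr 2
    rw [Nat.one_shiftLeft]
    norm_cast
  · -- t ≤ -1: the loop body never runs and the shift is by bit_length 0 = 0
    have hneg : t ≤ -1 := by omega
    have hA : pvLoopA t 1 (by norm_num) = 1 := by
      rw [pvLoopA]
      have : ¬ ((1 : Int) < t) := by omega
      simp [this]
    have hmax : max (t - 1) 0 = 0 := by omega
    rw [hA, hmax]
    norm_num [Nat.size_zero]
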